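-- pv_equiv track=rewrite | github.com/dragosprodan/proiect_sac | app/assets/python/main.py | language_register
-- ===== SOURCE A (Python) =====
-- def language_register(tokenized_word, dictionary):
--     count_data = []
--     for word in dictionary:
--         count = tokenized_word.count(word)
--         count_data.append(count)
--     if sum(count_data) > len(tokenized_word)/10:
--         return False
--     else:
--         return True
-- ===== SOURCE B (Python) =====
-- def language_register(tokenized_word, dictionary):
--     counts = {}
--     for w in dictionary:
--         counts[w] = counts.get(w, 0) + 1
--     total = 0
--     for t in tokenized_word:
--         total += counts.get(t, 0)
--     return total <= len(tokenized_word) / 10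
-- ===== Notes on version B (the rewrite author's own statement) =====
-- stated objective: faster
-- what changed: Replaces the per-dictionary-word scan of tokenized_word (tokenized_word.count inside a loop over dictionary) by building a frequency dict of dictionary once and summing those frequencies in a single pass over tokenized_word.
import Mathlib
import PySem

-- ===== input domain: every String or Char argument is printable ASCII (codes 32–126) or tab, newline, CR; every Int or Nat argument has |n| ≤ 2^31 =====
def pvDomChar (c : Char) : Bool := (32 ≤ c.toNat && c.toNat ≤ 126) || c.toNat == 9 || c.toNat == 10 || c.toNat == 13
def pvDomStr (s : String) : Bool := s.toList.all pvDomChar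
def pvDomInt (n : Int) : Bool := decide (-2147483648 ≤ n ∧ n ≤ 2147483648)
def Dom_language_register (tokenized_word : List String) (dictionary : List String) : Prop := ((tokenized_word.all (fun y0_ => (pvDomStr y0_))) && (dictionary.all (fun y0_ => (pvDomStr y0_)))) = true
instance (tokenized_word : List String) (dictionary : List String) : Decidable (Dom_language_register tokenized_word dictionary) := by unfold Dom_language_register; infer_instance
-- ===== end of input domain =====

-- B replaces A's per-dictionary-word scan of tokenized_word by a frequency dict of
-- dictionary built once and a single summing pass over tokenized_word (objective: faster).

-- ===== PORT A =====
-- Python compares sum(count_data) > len(tokenized_word)/10 on an int and a float;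
-- both sides come from ints far below 2^52 here, so the float comparison is exact and
-- equals the integer comparison 10 * sum > length, which is how it is ported.
def language_register (tokenized_word : List String) (dictionary : List String) : Bool :=
  let count_data : List Int :=
    dictionary.foldl (fun acc word => acc ++ [(PySem.List.count tokenized_word word : Int)]) []
  if 10 * count_data.sum > (tokenized_word.length : Int) then false else true

-- ===== PORT B =====
-- same exact float-vs-int note as for port A: total <= len/10 ported as 10 * total ≤ length
def language_register_alt (tokenized_word : List String) (dictionary : List String) : Bool :=
  let counts : PySem.Dict String Int :=
    dictionary.foldl (fun d w => d.insert w (d.getD w 0 + 1)) PySem.Dict.empty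
  let total : Int := tokenized_word.foldl (fun acc t => acc + counts.getD t 0) 0
  decide (10 * total ≤ (tokenized_word.length : Int))

-- ===== PRECONDITION & SPEC =====
def Spec_language_register (tokenized_word : List String) (dictionary : List String) (out : Bool) : Prop := out = language_register_alt tokenized_word dictionary
instance (tokenized_word : List String) (dictionary : List String) (out : Bool) : Decidable (Spec_language_register tokenized_word dictionary out) := by unfold Spec_language_register; infer_instance

-- ===== CLAIM (what is proved, stated in full; the proofs are below) =====
def Claim_equal_language_register : Prop := ∀ (tokenized_word : List String) (dictionary : List String), Dom_language_register tokenized_word dictionary → Spec_language_register tokenized_word dictionary (language_register tokenized_word dictionary)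

-- ===== LEMMAS AND PROOFS =====

-- the double-counting identity: summing tokenized_word.count over dictionary equals
-- summing dictionary.count over tokenized_word (both count the matching pairs)
theorem pv_count_swap (D T : List String) :
    (D.map (fun w => List.count w T)).sum = (T.map (fun t => List.count t D)).sum := by
  induction D with
  | nil => simp
  | cons d D ih =>
      have hite : ∀ (L : List String), (L.map (fun t => if (d == t) = true then 1 else 0)).sum = List.count d L := by
        intro L
        induction L with
        | nil => simp
        | cons x L ihL =>
            simp only [List.map_cons, List.sum_cons, List.count_cons, ihL]
            by_cases hx : x = d
            · simp [hx, Nat.add_comm]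
            · simp [hx]
              exact fun h => hx h.symm
      simp only [List.map_cons, List.sum_cons, List.count_cons, ih, List.sum_map_add, hite]
      omega

theorem pv_A_sum (T D : List String) :
    (D.foldl (fun acc word => acc ++ [(PySem.List.count T word : Int)]) []).sum
      = ((D.map (fun w => List.count w T)).sum : Nat) := by
  rw [PySem.List.foldl_append_singleton_eq_map]
  simp [PySem.List.count_eq, Function.comp_def]

theorem pv_B_sum (T D : List String) :
    T.foldl (fun acc t =>
        acc + (D.foldl (fun d w => d.insert w (d.getD w 0 + 1)) PySem.Dict.empty).getD t 0) (0 : Int)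
      = ((T.map (fun t => List.count t D)).sum : Nat) := by
  rw [PySem.List.foldl_add (g := fun t => (D.foldl (fun d w => d.insert w (d.getD w 0 + 1)) PySem.Dict.empty).getD t 0)]
  simp [PySem.Dict.getD_foldl_insert_add_one, Function.comp_def]

-- ===== VERDICT (by name: the statement is the Claim_ definition above) =====
theorem language_register_spec : Claim_equal_language_register := by
  intro T D _
  unfold Spec_language_register language_register language_register_alt
  simp only
  rw [pv_A_sum, pv_B_sum, pv_count_swap]
  by_cases h : 10 * (((T.map (fun t => List.count t D)).sum : Nat) : Int) > (T.length : Int)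
  · rw [if_pos h]
    exact (decide_eq_false (by omega)).symm
  · rw [if_neg h]
    exact (decide_eq_true (by omega)).symm
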